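-- pv_equiv track=rewrite | github.com/TK-firewill/advent-of-code-2025 | day_3/day_3.py | solve_bank
-- ===== SOURCE A (Python) =====
-- def solve_bank(bank: list[int], trailing: int) -> int:
-- 	if len(bank) < trailing + 1:
-- 		raise ValueError
-- 	elif trailing <= 0:
-- 		return max(bank)
-- 	else:
-- 		left_bank: list[int] = bank[:-trailing]
-- 		index: int = left_bank.index(max(left_bank))
-- 		return max(left_bank) * (10**trailing) + solve_bank(bank[index+1:], trailing-1)
-- ===== SOURCE B (Python) =====
-- def solve_bank(bank: list[int], trailing: int) -> int:
-- 	if len(bank) < trailing + 1: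
-- 		raise ValueError
-- 	if trailing <= 0:
-- 		return max(bank)
-- 	# Monotonic stack: keep the greedily-largest subsequence of trailing+1
-- 	# elements in one pass, instead of re-scanning slices per digit.
-- 	keep = trailing + 1
-- 	drops = len(bank) - keep
-- 	stack = []
-- 	for x in bank:
-- 		while stack and drops > 0 and stack[-1] < x:
-- 			stack.pop()
-- 			drops -= 1
-- 		stack.append(x)
-- 	result = 0
-- 	for v in stack[:keep]:
-- 		result = result * 10 + v
-- 	return result
-- ===== Notes on version B (the rewrite author's own statement) =====
-- stated objective: faster
-- what changed: A's recursion re-scans a fresh slice for max and its index once per digit; B builds the same greedily chosen subsequence in a single monotonic-stack pass over the list and folds it into the number.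
import Mathlib
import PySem

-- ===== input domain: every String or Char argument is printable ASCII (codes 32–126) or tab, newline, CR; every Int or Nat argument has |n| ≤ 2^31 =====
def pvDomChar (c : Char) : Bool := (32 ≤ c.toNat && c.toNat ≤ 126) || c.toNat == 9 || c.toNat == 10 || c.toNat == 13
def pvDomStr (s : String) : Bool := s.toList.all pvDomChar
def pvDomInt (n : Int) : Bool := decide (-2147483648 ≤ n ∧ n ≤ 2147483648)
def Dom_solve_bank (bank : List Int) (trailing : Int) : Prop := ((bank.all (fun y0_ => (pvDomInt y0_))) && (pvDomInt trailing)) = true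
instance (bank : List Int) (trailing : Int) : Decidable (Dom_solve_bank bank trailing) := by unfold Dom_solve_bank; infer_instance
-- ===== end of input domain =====

-- B replaces A's per-digit re-scan of a fresh slice (greedy leftmost-max recursion) by a
-- single monotonic-stack pass keeping the same greedily chosen subsequence.

-- ===== PORT A =====
-- Literal port of A's recursion.  Where Python raises ValueError (len(bank) < trailing+1,
-- or max([]) on an empty bank) the port returns 0; those inputs are excluded by Pre_.
def solve_bank (bank : List Int) (trailing : Int) : Int :=
  if (bank.length : Int) < trailing + 1 then 0  -- raise ValueError (excluded by Pre_)
  else if trailing ≤ 0 then ((PySem.List.max? bank (fun x => x)).getD 0)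
  else
    let left_bank := PySem.List.slice bank none (some (-trailing))
    let index := (PySem.List.index? left_bank ((PySem.List.max? left_bank (fun x => x)).getD 0)).getD 0
    ((PySem.List.max? left_bank (fun x => x)).getD 0) * 10 ^ trailing.toNat
      + solve_bank (PySem.List.slice bank (some ((index : Int) + 1)) none) (trailing - 1)
termination_by trailing.toNat
decreasing_by omega

-- ===== PORT B =====
-- the `while stack and drops > 0 and stack[-1] < x: stack.pop(); drops -= 1` loop
def popB (s : List Int) (drops : Int) (x : Int) : List Int × Int :=
  if h : s ≠ [] then
    if 0 < drops ∧ s.getLast h < x then popB s.dropLast (drops - 1) x else (s, drops)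
  else (s, drops)
termination_by s.length
decreasing_by
  have hne : s.length ≠ 0 := fun hh => h (List.length_eq_zero_iff.mp hh)
  simp only [List.length_dropLast]; omega

-- one iteration of the `for x in bank` loop: state = (stack, drops)
def stepB (acc : List Int × Int) (x : Int) : List Int × Int :=
  ((popB acc.1 acc.2 x).1 ++ [x], (popB acc.1 acc.2 x).2)

def solve_bank_alt (bank : List Int) (trailing : Int) : Int :=
  if (bank.length : Int) < trailing + 1 then 0  -- raise ValueError (excluded by Pre_)
  else if trailing ≤ 0 then ((PySem.List.max? bank (fun x => x)).getD 0)
  else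
    let keep := trailing + 1
    let st := bank.foldl stepB ([], (bank.length : Int) - keep)
    (PySem.List.slice st.1 none (some keep)).foldl (fun r v => r * 10 + v) 0

-- ===== PRECONDITION & SPEC =====
-- Pre_ excludes exactly the inputs where Python A raises ValueError: len(bank) < trailing+1
-- (explicit raise) and the empty bank with trailing <= 0 (max([]) raises).
def Pre_solve_bank (bank : List Int) (trailing : Int) : Prop :=
  bank ≠ [] ∧ trailing < (bank.length : Int)
instance (bank : List Int) (trailing : Int) : Decidable (Pre_solve_bank bank trailing) := by
  unfold Pre_solve_bank; infer_instance

def pvWitness_solve_bank : List Int × Int := ([3, 1, 4, 1, 5], 2)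

def Spec_solve_bank (bank : List Int) (trailing : Int) (out : Int) : Prop := out = solve_bank_alt bank trailing
instance (bank : List Int) (trailing : Int) (out : Int) : Decidable (Spec_solve_bank bank trailing out) := by unfold Spec_solve_bank; infer_instance

-- ===== CLAIM (what is proved, stated in full; the proofs are below) =====
def Claim_equal_solve_bank : Prop := ∀ (bank : List Int) (trailing : Int), Dom_solve_bank bank trailing → Pre_solve_bank bank trailing → Spec_solve_bank bank trailing (solve_bank bank trailing)

-- ===== LEMMAS AND PROOFS =====

-- Proof-side model of B's stack with the top at the HEAD of the list.
def popA : List Int → Int → Int → List Int × Int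
  | [], b, _ => ([], b)
  | t :: s, b, x => if 0 < b ∧ t < x then popA s (b - 1) x else (t :: s, b)

def stepA (acc : List Int × Int) (x : Int) : List Int × Int :=
  (x :: (popA acc.1 acc.2 x).1, (popA acc.1 acc.2 x).2)

def runA (xs : List Int) (s : List Int) (b : Int) : List Int × Int := xs.foldl stepA (s, b)

theorem popA_snd_sub_length (s : List Int) (b x : Int) :
    (popA s b x).2 - ((popA s b x).1.length : Int) = b - (s.length : Int) := by
  induction s generalizing b with
  | nil => simp [popA]
  | cons t s ih =>
    simp only [popA]
    split
    · have := ih (b - 1); simp at this ⊢; omega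
    · simp

theorem popA_snd_nonneg (s : List Int) (b x : Int) (hb : 0 ≤ b) : 0 ≤ (popA s b x).2 := by
  induction s generalizing b with
  | nil => simpa [popA]
  | cons t s ih =>
    simp only [popA]
    split
    · exact ih (b - 1) (by omega)
    · simpa

theorem popA_mem (s : List Int) (b x : Int) {y : Int} (hy : y ∈ (popA s b x).1) : y ∈ s := by
  induction s generalizing b with
  | nil => simp [popA] at hy
  | cons t s ih =>
    simp only [popA] at hy
    split at hy
    · exact List.mem_cons_of_mem _ (ih (b - 1) hy)
    · simpa using hy

theorem popA_clear (s : List Int) (b x : Int) (hlt : ∀ y ∈ s, y < x)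
    (hb : (s.length : Int) ≤ b) : popA s b x = ([], b - s.length) := by
  induction s generalizing b with
  | nil => simp [popA]
  | cons t s ih =>
    simp only [popA]
    rw [if_pos ⟨by simp at hb; omega, hlt t (by simp)⟩]
    rw [ih (b - 1) (fun y hy => hlt y (List.mem_cons_of_mem _ hy)) (by simp at hb ⊢; omega)]
    simp; ring_nf

theorem popA_append_bottom (u : List Int) (m b x : Int)
    (h : b - (u.length : Int) ≤ 0 ∨ x ≤ m) :
    popA (u ++ [m]) b x = ((popA u b x).1 ++ [m], (popA u b x).2) := by
  induction u generalizing b with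
  | nil =>
    simp only [popA, List.nil_append]
    rw [if_neg (by rintro ⟨h1, h2⟩; simp at h; omega)]
  | cons t u ih =>
    simp only [List.cons_append, popA]
    split
    · exact ih (b - 1) (by simp at h ⊢; omega)
    · simp

theorem runA_cons (x : Int) (xs s : List Int) (b : Int) :
    runA (x :: xs) s b = runA xs (x :: (popA s b x).1) (popA s b x).2 := rfl

theorem runA_mem (xs : List Int) : ∀ (s : List Int) (b : Int) {y : Int},
    y ∈ (runA xs s b).1 → y ∈ s ∨ y ∈ xs := by
  induction xs with
  | nil => intro s b y hy; exact Or.inl (by simpa [runA, List.foldl] using hy)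
  | cons x xs ih =>
    intro s b y hy
    rw [runA_cons] at hy
    rcases ih _ _ hy with h | h
    · rcases List.mem_cons.mp h with h | h
      · exact Or.inr (by simp [h])
      · exact Or.inl (popA_mem s b x h)
    · exact Or.inr (List.mem_cons_of_mem _ h)

theorem runA_snd_sub_length (xs : List Int) : ∀ (s : List Int) (b : Int),
    (runA xs s b).2 - ((runA xs s b).1.length : Int)
      = b - (s.length : Int) - (xs.length : Int) := by
  induction xs with
  | nil => intro s b; simp [runA]
  | cons x xs ih =>
    intro s b
    rw [runA_cons, ih]
    have := popA_snd_sub_length s b x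
    simp only [List.length_cons]
    push_cast
    omega

theorem runA_snd_nonneg (xs : List Int) : ∀ (s : List Int) (b : Int), 0 ≤ b → 0 ≤ (runA xs s b).2 := by
  induction xs with
  | nil => intro s b hb; simpa [runA]
  | cons x xs ih =>
    intro s b hb
    rw [runA_cons]
    exact ih _ _ (popA_snd_nonneg s b x hb)

theorem runA_length_ge (xs : List Int) (b : Int) (hb : 0 ≤ b) :
    (xs.length : Int) - b ≤ ((runA xs [] b).1.length : Int) := by
  have h1 := runA_snd_sub_length xs [] b
  have h2 := runA_snd_nonneg xs [] b hb
  simp at h1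
  omega

theorem runA_bottom (xs : List Int) : ∀ (u : List Int) (m b : Int),
    (∀ (j : Nat) (hj : j < xs.length), (j : Int) < b - (u.length : Int) → xs[j] ≤ m) →
    runA xs (u ++ [m]) b = ((runA xs u b).1 ++ [m], (runA xs u b).2) := by
  induction xs with
  | nil => intro u m b h; simp [runA]
  | cons x xs ih =>
    intro u m b h
    rw [runA_cons, runA_cons]
    have hx : b - (u.length : Int) ≤ 0 ∨ x ≤ m := by
      by_cases hb : 0 < b - (u.length : Int)
      · exact Or.inr (h 0 (by simp) (by simpa using hb))
      · exact Or.inl (by omega)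
    rw [popA_append_bottom u m b x hx]
    have hcons : x :: ((popA u b x).1 ++ [m]) = (x :: (popA u b x).1) ++ [m] := rfl
    rw [hcons, ih]
    intro j hj hjb
    have hlen := popA_snd_sub_length u b x
    simp only [List.length_cons] at hjb
    push_cast at hjb hlen
    have := h (j + 1) (by simpa using Nat.succ_lt_succ hj) (by omega)
    simpa using this

theorem runA_decompose (ys : List Int) (m : Int) (rest : List Int) (b : Int)
    (hys : ∀ y ∈ ys, y < m) (hb : (ys.length : Int) ≤ b)
    (hrest : ∀ (j : Nat) (hj : j < rest.length), (j : Int) < b - (ys.length : Int) → rest[j] ≤ m) :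
    runA (ys ++ m :: rest) [] b
      = ((runA rest [] (b - ys.length)).1 ++ [m], (runA rest [] (b - ys.length)).2) := by
  have hsplit : runA (ys ++ m :: rest) [] b
      = runA (m :: rest) (runA ys [] b).1 (runA ys [] b).2 := by
    simp [runA, List.foldl_append]
  rw [hsplit, runA_cons]
  have hS : ∀ y ∈ (runA ys [] b).1, y < m := by
    intro y hy
    rcases runA_mem ys [] b hy with h | h
    · simp at h
    · exact hys y h
  have hlen : (runA ys [] b).2 - ((runA ys [] b).1.length : Int) = b - (ys.length : Int) := by
    have := runA_snd_sub_length ys [] b; simp at this; omega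
  have hc := popA_clear (runA ys [] b).1 (runA ys [] b).2 m hS (by omega)
  rw [hc]
  simp only
  rw [hlen]
  have hm1 : (m :: ([] : List Int)) = [] ++ [m] := rfl
  rw [hm1, runA_bottom rest [] m (b - ys.length)
    (by intro j hj hjb; exact hrest j hj (by simpa using hjb))]
  simp

theorem foldl_mul_add (l : List Int) (a : Int) :
    l.foldl (fun r v => r * 10 + v) a
      = a * 10 ^ l.length + l.foldl (fun r v => r * 10 + v) 0 := by
  induction l generalizing a with
  | nil => simp
  | cons v l ih =>
    simp only [List.foldl_cons, List.length_cons]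
    rw [ih (a * 10 + v), ih (0 * 10 + v)]
    ring

theorem popB_eq_popA (s : List Int) (b x : Int) :
    popB s b x = ((popA s.reverse b x).1.reverse, (popA s.reverse b x).2) := by
  induction s using List.reverseRecOn generalizing b with
  | nil => rw [popB]; simp [popA]
  | append_singleton u a ih =>
    rw [popB]
    have hne : u ++ [a] ≠ [] := by simp
    rw [dif_pos hne]
    have hlast : (u ++ [a]).getLast hne = a := by simp
    have hdrop : (u ++ [a]).dropLast = u := by simp
    rw [hlast, hdrop]
    have hrev : (u ++ [a]).reverse = a :: u.reverse := by simp
    rw [hrev]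
    simp only [popA]
    split
    · exact ih (b - 1)
    · simp

theorem foldl_stepB_eq (xs : List Int) : ∀ (s : List Int) (b : Int),
    xs.foldl stepB (s, b) = ((runA xs s.reverse b).1.reverse, (runA xs s.reverse b).2) := by
  induction xs with
  | nil => intro s b; simp [runA]
  | cons x xs ih =>
    intro s b
    have hstep : stepB (s, b) x
        = ((stepA (s.reverse, b) x).1.reverse, (stepA (s.reverse, b) x).2) := by
      simp only [stepB, stepA, popB_eq_popA, List.reverse_cons]
    rw [List.foldl_cons, hstep, ih]
    have hrr : (stepA (s.reverse, b) x).1.reverse.reverse = (stepA (s.reverse, b) x).1 := by simp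
    rw [hrr]
    rfl

theorem runA_take_key (bank : List Int) (k : Nat) (hk : k + 1 ≤ bank.length) :
    ∃ (m : Int) (i : Nat),
      PySem.List.max? (List.take (bank.length - k) bank) (fun x => x) = some m ∧
      PySem.List.index? (List.take (bank.length - k) bank) m = some i ∧
      (i : Int) ≤ (bank.length : Int) - k - 1 ∧
      List.take (k + 1) (runA bank [] ((bank.length : Int) - k - 1)).1.reverse
        = m :: List.take k (runA (List.drop (i + 1) bank) []
            (((List.drop (i + 1) bank).length : Int) - k)).1.reverse := by
  set n := bank.length with hn
  set window := List.take (n - k) bank with hwdef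
  have hwlen : window.length = n - k := by
    simp [hwdef, List.length_take]; omega
  have hwne : window ≠ [] := by
    intro h; rw [h] at hwlen; simp at hwlen; omega
  obtain ⟨m, hm⟩ : ∃ m, PySem.List.max? window (fun x => x) = some m := by
    cases hmax : PySem.List.max? window (fun x : Int => x) with
    | none => exact absurd ((PySem.List.max?_eq_none_iff _ _).mp hmax) hwne
    | some m => exact ⟨m, rfl⟩
  have hmem : m ∈ window := PySem.List.max?_mem hm
  obtain ⟨i, hi⟩ : ∃ i, PySem.List.index? window m = some i :=
    Option.isSome_iff_exists.mp ((PySem.List.index?_isSome_iff window m).mpr hmem)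
  obtain ⟨pre, suf, hweq, hprelen, hmpre⟩ := (PySem.List.index?_eq_some_iff window m i).mp hi
  set rest := suf ++ List.drop (n - k) bank with hrestdef
  have hbank : bank = (pre ++ [m]) ++ rest := by
    conv_lhs => rw [← List.take_append_drop (n - k) bank]
    rw [← hwdef, hweq, hrestdef]
    simp
  have hdropi : List.drop (i + 1) bank = rest := by
    conv_lhs => rw [hbank]
    have hl : i + 1 = (pre ++ [m]).length := by simp [hprelen]
    rw [hl, List.drop_left]
  have hile : i + 1 ≤ n - k := by
    have : window.length = pre.length + 1 + suf.length := by rw [hweq]; simp; omega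
    omega
  have hkn : k ≤ n := by omega
  have hiInt : (i : Int) ≤ (n : Int) - k - 1 := by
    have : ((n - k : Nat) : Int) = (n : Int) - k := by omega
    omega
  refine ⟨m, i, hm, hi, hiInt, ?_⟩
  have hrestlen : rest.length = n - i - 1 := by
    rw [← hdropi, List.length_drop]; omega
  have hdec := runA_decompose pre m rest ((n : Int) - k - 1)
    (by
      intro y hy
      have hyw : y ∈ window := by rw [hweq]; exact List.mem_append_left _ hy
      have hle : y ≤ m := PySem.List.max?_isMax hm y hyw
      have hne : y ≠ m := fun h => hmpre (h ▸ hy)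
      omega)
    (by rw [hprelen]; omega)
    (by
      intro j hj hjb
      rw [hprelen] at hjb
      have hjw : i + 1 + j < window.length := by omega
      have hjn : i + 1 + j < n := by omega
      have h1 : rest[j]'hj = bank[i + 1 + j]'hjn := by
        have he := List.getElem_of_eq hdropi.symm hj
        rw [he, List.getElem_drop]
      have h2 : window[i + 1 + j]'hjw = bank[i + 1 + j]'hjn := by
        have he := List.getElem_of_eq hwdef hjw
        rw [he, List.getElem_take]
      have hrj : rest[j]'hj = window[i + 1 + j]'hjw := by rw [h1, h2]
      rw [hrj]
      exact PySem.List.max?_isMax hm _ (List.getElem_mem hjw))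
  conv_lhs => rw [hbank]
  have hassoc : (pre ++ [m]) ++ rest = pre ++ m :: rest := by simp
  rw [hassoc, hdec]
  have hbud : (n : Int) - k - 1 - pre.length = (rest.length : Int) - k := by
    rw [hprelen, hrestlen]; omega
  rw [hbud, hdropi]
  simp [List.take_succ_cons]

theorem solve_bank_eq_stack (k : Nat) : ∀ (bank : List Int), k + 1 ≤ bank.length →
    solve_bank bank (k : Int)
      = (List.take (k + 1) (runA bank [] ((bank.length : Int) - k - 1)).1.reverse).foldl
          (fun r v => r * 10 + v) 0 := by
  induction k with
  | zero =>
    intro bank h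
    obtain ⟨m, i, hm, hi, hiInt, heq⟩ := runA_take_key bank 0 h
    rw [solve_bank]
    rw [if_neg (by push_cast; omega), if_pos (by norm_num)]
    simp only [Nat.sub_zero, List.take_length] at hm
    push_cast at heq ⊢
    rw [heq, hm]
    simp
  | succ j ih =>
    intro bank h
    obtain ⟨m, i, hm, hi, hiInt, heq⟩ := runA_take_key bank (j + 1) h
    rw [solve_bank]
    rw [if_neg (by push_cast; omega), if_neg (by push_cast; omega)]
    simp only []
    rw [PySem.List.slice_to_neg_natCast bank (j + 1) (Nat.succ_pos j)]
    rw [hm]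
    simp only [Option.getD_some]
    rw [hi]
    simp only [Option.getD_some]
    have hslice2 : PySem.List.slice bank (some ((i : Int) + 1)) none = List.drop (i + 1) bank := by
      rw [PySem.List.slice_from bank (by positivity)]
      congr 1
    rw [hslice2]
    set rest := List.drop (i + 1) bank with hrest
    have hrlen : rest.length = bank.length - (i + 1) := by rw [hrest, List.length_drop]
    have hjr : j + 1 ≤ rest.length := by
      have : (bank.length : Int) ≥ 0 := by positivity
      omega
    have htr : ((j:Int) + 1) - 1 = (j : Int) := by ring
    have hpow : ((j:Int) + 1).toNat = j + 1 := by omega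
    have hcast : ((j + 1 : Nat) : Int) = (j : Int) + 1 := by push_cast; ring
    rw [hcast, htr, hpow]
    rw [ih rest hjr]
    rw [hcast] at heq
    have hbud : (rest.length : Int) - ((j:Int) + 1) = (rest.length : Int) - (j:Int) - 1 := by ring
    rw [hbud] at heq
    rw [heq]
    set W := (runA rest [] ((rest.length : Int) - (j : Int) - 1)).1 with hW
    have hWlen : j + 1 ≤ W.length := by
      have h0 : (0:Int) ≤ (rest.length : Int) - (j : Int) - 1 := by omega
      have := runA_length_ge rest ((rest.length : Int) - (j : Int) - 1) h0
      rw [← hW] at this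
      omega
    rw [List.foldl_cons, foldl_mul_add]
    rw [foldl_mul_add (List.take (j + 1) W.reverse) (0 * 10 + m)]
    have hlen2 : (List.take (j + 1) W.reverse).length = j + 1 := by
      rw [List.length_take, List.length_reverse]
      omega
    rw [hlen2]
    ring

-- ===== VERDICT (by name: the statement is the Claim_ definition above) =====
theorem solve_bank_spec : Claim_equal_solve_bank := by
  intro bank trailing _dom hpre
  obtain ⟨hne, hlt⟩ := hpre
  have hlen1 : 1 ≤ bank.length := List.length_pos_of_ne_nil hne
  unfold Spec_solve_bank
  by_cases ht : trailing ≤ 0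
  · rw [solve_bank, solve_bank_alt]
    rw [if_neg (show ¬((bank.length : Int) < trailing + 1) by omega), if_pos ht,
        if_neg (show ¬((bank.length : Int) < trailing + 1) by omega), if_pos ht]
  · set k := trailing.toNat with hkdef
    have hk : trailing = (k : Int) := by omega
    have hkn : k + 1 ≤ bank.length := by omega
    rw [solve_bank_alt]
    rw [if_neg (show ¬((bank.length : Int) < trailing + 1) by omega), if_neg ht]
    simp only []
    rw [foldl_stepB_eq]
    simp only [List.reverse_nil]
    rw [PySem.List.slice_to _ (by omega)]
    have htn : (trailing + 1).toNat = k + 1 := by omega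
    have hbud : (bank.length : Int) - (trailing + 1) = (bank.length : Int) - (k : Int) - 1 := by
      omega
    rw [htn, hbud, hk]
    exact solve_bank_eq_stack k bank hkn
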